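-- pv_equiv track=rewrite | github.com/unamfi/sistop-2023-1 | tareas/tarea1.py | compactacion
-- ===== SOURCE A (Python) =====
-- def compactacion(memoria):
--     newM=[]
--     for i in range (len(memoria)):
--         if memoria[i] != '-':
--             newM.append(memoria[i])
--     for i in range (len(memoria)):
--         if memoria[i] == '-':
--             newM.append(memoria[i])
--     memoria = newM
--     return memoria
-- ===== SOURCE B (Python) =====
-- def compactacion(memoria):
--     return sorted(memoria, key=lambda x: x == '-')
-- ===== Notes on version B (the rewrite author's own statement) =====
-- stated objective: idiomatic
-- what changed: Replaces A's two index-based filtering scans with a single stable sort keyed on the boolean 'is a dash', which by stability keeps non-dash entries in order and moves all dashes to the end.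
import Mathlib
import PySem

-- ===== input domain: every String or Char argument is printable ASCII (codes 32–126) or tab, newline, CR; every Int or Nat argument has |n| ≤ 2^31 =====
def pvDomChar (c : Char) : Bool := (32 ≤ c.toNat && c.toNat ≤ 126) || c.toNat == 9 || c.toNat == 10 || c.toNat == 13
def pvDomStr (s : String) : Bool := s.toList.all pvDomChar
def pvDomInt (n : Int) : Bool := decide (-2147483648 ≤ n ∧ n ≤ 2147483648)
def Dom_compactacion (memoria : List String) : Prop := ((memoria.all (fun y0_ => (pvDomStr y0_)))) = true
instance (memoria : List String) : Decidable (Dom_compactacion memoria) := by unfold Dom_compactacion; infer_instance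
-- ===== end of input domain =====

-- B replaces A's two filtering scans with one stable sort keyed on 'is a dash'; objective: idiomatic.

-- ===== PORT A =====
def compactacion (memoria : List String) : List String :=
  let newM : List String :=
    (PySem.List.pyRange 0 (memoria.length : Int) 1).foldl
      (fun acc i => if PySem.List.pyGetD memoria i "" ≠ "-" then acc ++ [PySem.List.pyGetD memoria i ""] else acc) []
  let newM :=
    (PySem.List.pyRange 0 (memoria.length : Int) 1).foldl
      (fun acc i => if PySem.List.pyGetD memoria i "" = "-" then acc ++ [PySem.List.pyGetD memoria i ""] else acc) newM
  newM

-- ===== PORT B =====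
def compactacion_alt (memoria : List String) : List String :=
  PySem.List.sorted memoria (fun x => x == "-") false

-- ===== PRECONDITION & SPEC =====
def Spec_compactacion (memoria : List String) (out : List String) : Prop := out = compactacion_alt memoria
instance (memoria : List String) (out : List String) : Decidable (Spec_compactacion memoria out) := by unfold Spec_compactacion; infer_instance

-- ===== CLAIM (what is proved, stated in full; the proofs are below) =====
def Claim_equal_compactacion : Prop := ∀ (memoria : List String), Dom_compactacion memoria → Spec_compactacion memoria (compactacion memoria)

-- ===== LEMMAS AND PROOFS =====

-- a true-key element is inserted at the very end (it is never strictly key-below anything)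
theorem insertBy_true_key (l : List String) (x : String) (hx : (x == "-") = true) :
    PySem.List.insertBy (fun a b => decide ((a == "-") < (b == "-"))) x l = l ++ [x] := by
  induction l with
  | nil => rfl
  | cons y ys ih =>
    simp only [PySem.List.insertBy]
    have : decide ((x == "-") < (y == "-")) = false := by
      rw [hx]; cases h : (y == "-") <;> decide
    simp only [this, if_false, Bool.false_eq_true]
    simp [ih]

-- a false-key element passes all false-key elements and stops before the first true-key one
theorem insertBy_false_key (fs ds : List String) (x : String) (hx : (x == "-") = false)
    (hfs : ∀ y ∈ fs, (y == "-") = false) (hds : ∀ y ∈ ds, (y == "-") = true) :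
    PySem.List.insertBy (fun a b => decide ((a == "-") < (b == "-"))) x (fs ++ ds)
      = fs ++ [x] ++ ds := by
  induction fs with
  | nil =>
    cases ds with
    | nil => rfl
    | cons d ds' =>
      simp only [PySem.List.insertBy, List.nil_append]
      have : decide ((x == "-") < (d == "-")) = true := by
        rw [hx, hds d (by simp)]; decide
      simp only [this, if_true]
      simp
  | cons f fs' ih =>
    simp only [PySem.List.insertBy, List.cons_append]
    have : decide ((x == "-") < (f == "-")) = false := by
      rw [hx, hfs f (by simp)]; decide
    simp only [this, if_false, Bool.false_eq_true]
    simp only [List.cons.injEq, true_and]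
    exact ih (fun y hy => hfs y (by simp [hy]))

-- the stable-sort fold maintains 'false-key block ++ true-key block', each in input order
theorem sorted_fold_partition (xs fs ds : List String)
    (hfs : ∀ y ∈ fs, (y == "-") = false) (hds : ∀ y ∈ ds, (y == "-") = true) :
    xs.foldl (fun acc x => PySem.List.insertBy (fun a b => decide ((a == "-") < (b == "-"))) x acc) (fs ++ ds)
      = (fs ++ xs.filter (fun x => x != "-")) ++ (ds ++ xs.filter (fun x => x == "-")) := by
  induction xs generalizing fs ds with
  | nil => simp
  | cons x xs' ih =>
    simp only [List.foldl_cons]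
    by_cases hx : (x == "-") = true
    · have hne : (x != "-") = false := by simp [bne, hx]
      rw [insertBy_true_key (fs ++ ds) x hx, List.append_assoc]
      have hds' : ∀ y ∈ ds ++ [x], (y == "-") = true := by
        intro y hy
        rcases List.mem_append.mp hy with h | h
        · exact hds y h
        · simp at h; subst h; exact hx
      rw [ih fs (ds ++ [x]) hfs hds']
      simp [hx, hne]
    · have hx' : (x == "-") = false := by simpa using hx
      have hne : (x != "-") = true := by simp [bne, hx']
      rw [insertBy_false_key fs ds x hx' hfs hds]
      have hfs' : ∀ y ∈ fs ++ [x], (y == "-") = false := by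
        intro y hy
        rcases List.mem_append.mp hy with h | h
        · exact hfs y h
        · simp at h; subst h; exact hx'
      rw [ih (fs ++ [x]) ds hfs' hds]
      simp [hx', hne]

theorem compactacion_alt_eq_filters (memoria : List String) :
    compactacion_alt memoria
      = memoria.filter (fun x => x != "-") ++ memoria.filter (fun x => x == "-") := by
  unfold compactacion_alt PySem.List.sorted
  simpa using sorted_fold_partition memoria [] [] (by simp) (by simp)

-- ===== VERDICT (by name: the statement is the Claim_ definition above) =====
theorem compactacion_spec : Claim_equal_compactacion := by
  intro memoria _
  unfold Spec_compactacion compactacion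
  show List.foldl _ (List.foldl _ [] (PySem.List.pyRange 0 (memoria.length : Int))) (PySem.List.pyRange 0 (memoria.length : Int)) = _
  rw [PySem.List.foldl_pyRange_zero_pyGetD' memoria "" (fun acc x => if x = "-" then acc ++ [x] else acc),
      PySem.List.foldl_pyRange_zero_pyGetD' memoria "" (fun acc x => if x ≠ "-" then acc ++ [x] else acc) []]
  rw [PySem.List.foldl_append_ite_eq_filter, PySem.List.foldl_append_ite_eq_filter]
  rw [compactacion_alt_eq_filters, List.nil_append]
  have h1 : memoria.filter (fun x => decide (x ≠ "-")) = memoria.filter (fun x => x != "-") :=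
    List.filter_congr (fun x _ => by simp [bne, Bool.beq_eq_decide_eq])
  have h2 : memoria.filter (fun x => decide (x = "-")) = memoria.filter (fun x => x == "-") :=
    List.filter_congr (fun x _ => by simp [Bool.beq_eq_decide_eq])
  rw [h1, h2]
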